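-- pv_equiv track=rewrite | github.com/bheki-maenetja/small-projects-py | interview-questions/ttp-interview.py | sum_of_digit_words
-- ===== SOURCE A (Python) =====
-- def sum_of_digit_words(numerical_word):
--     word_dict = {
--         "one": 1,
--         "two": 2,
--         "three": 3
--     }
--
--     numerical_word = numerical_word.lower()
--     sub_string = ""
--     return_value = 0
--
--     while numerical_word != "":
--         sub_string += numerical_word[0]
--         numerical_word = numerical_word[1:]
--         if sub_string in word_dict:
--             return_value += word_dict[sub_string]
--             sub_string = ""
--
--     return return_value
-- ===== SOURCE B (Python) =====
-- def sum_of_digit_words(numerical_word):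
--     s = numerical_word.lower()
--     total = 0
--     pos = 0
--     n = len(s)
--     while pos < n:
--         if s[pos:pos+3] == "one":
--             total += 1
--             pos += 3
--         elif s[pos:pos+3] == "two":
--             total += 2
--             pos += 3
--         elif s[pos:pos+5] == "three":
--             total += 3
--             pos += 5
--         else:
--             break
--     return total
-- ===== Notes on version B (the rewrite author's own statement) =====
-- stated objective: faster
-- what changed: B replaces A's char-by-char scan (which grows a sub_string buffer, resets it on a dict hit, and re-slices the whole remaining string each step) with direct fixed-length window probing at an integer position: compare s[pos:pos+3]/s[pos:pos+5] against the words, jump by the word length on a match, break otherwise.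
import Mathlib
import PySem

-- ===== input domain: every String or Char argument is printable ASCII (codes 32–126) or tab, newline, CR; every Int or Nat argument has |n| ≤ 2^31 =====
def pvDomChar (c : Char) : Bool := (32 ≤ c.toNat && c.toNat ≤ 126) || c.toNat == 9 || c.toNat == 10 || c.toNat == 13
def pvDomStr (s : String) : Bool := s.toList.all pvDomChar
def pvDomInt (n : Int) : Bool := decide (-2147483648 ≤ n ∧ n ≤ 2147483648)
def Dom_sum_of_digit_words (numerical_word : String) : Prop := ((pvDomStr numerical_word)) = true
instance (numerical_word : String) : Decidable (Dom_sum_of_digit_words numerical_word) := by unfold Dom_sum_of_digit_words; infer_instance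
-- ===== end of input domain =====

-- B replaces A's growing-buffer scan (with its per-step re-slicing of the remaining string) by fixed-length window probing with length jumps; objective: faster (measured).
-- String literals "one"/"two"/"three" are represented by their char lists.

-- ===== PORT A =====
-- word_dict = {"one": 1, "two": 2, "three": 3}
def pvWordDict : PySem.Dict (List Char) Int :=
  PySem.Dict.ofList [(['o','n','e'], 1), (['t','w','o'], 2), (['t','h','r','e','e'], 3)]

-- the while loop: state = (remaining chars, sub_string, return_value)
def pvALoop : List Char → List Char → Int → Int
  | [], _, acc => acc
  | c :: rest, sub, acc =>
    let sub' := sub ++ [c]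
    match PySem.Dict.get? pvWordDict sub' with
    | some v => pvALoop rest [] (acc + v)
    | none => pvALoop rest sub' acc

def sum_of_digit_words (numerical_word : String) : Int :=
  pvALoop (PySem.Str.lower numerical_word).toList [] 0

-- ===== PORT B =====
-- the while loop of Source B on the suffix starting at pos: s[pos:pos+k] = take k, pos += k = drop k
def pvBLoop : List Char → Int
  | [] => 0
  | c :: rest =>
    if (c :: rest).take 3 = ['o','n','e'] then 1 + pvBLoop ((c :: rest).drop 3)
    else if (c :: rest).take 3 = ['t','w','o'] then 2 + pvBLoop ((c :: rest).drop 3)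
    else if (c :: rest).take 5 = ['t','h','r','e','e'] then 3 + pvBLoop ((c :: rest).drop 5)
    else 0
termination_by t => t.length
decreasing_by all_goals simp

def sum_of_digit_words_alt (numerical_word : String) : Int :=
  pvBLoop (PySem.Str.lower numerical_word).toList

-- ===== PRECONDITION & SPEC =====
def Spec_sum_of_digit_words (numerical_word : String) (out : Int) : Prop := out = sum_of_digit_words_alt numerical_word
instance (numerical_word : String) (out : Int) : Decidable (Spec_sum_of_digit_words numerical_word out) := by unfold Spec_sum_of_digit_words; infer_instance

-- ===== CLAIM (what is proved, stated in full; the proofs are below) =====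
def Claim_equal_sum_of_digit_words : Prop := ∀ (numerical_word : String), Dom_sum_of_digit_words numerical_word → Spec_sum_of_digit_words numerical_word (sum_of_digit_words numerical_word)

-- ===== LEMMAS AND PROOFS =====

-- once sub can no longer be grown (by a prefix of the remaining input) into any dict word, A's loop adds nothing
lemma pvALoop_dead : ∀ (rem sub : List Char) (acc : Int),
    ¬ (sub <+: ['o','n','e'] ∧ (['o','n','e'].drop sub.length) <+: rem) →
    ¬ (sub <+: ['t','w','o'] ∧ (['t','w','o'].drop sub.length) <+: rem) →
    ¬ (sub <+: ['t','h','r','e','e'] ∧ (['t','h','r','e','e'].drop sub.length) <+: rem) →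
    pvALoop rem sub acc = acc := by
  intro rem
  induction rem with
  | nil => intro sub acc _ _ _; rfl
  | cons c rest ih =>
    intro sub acc h1 h2 h3
    have key : ∀ (w : List Char),
        ¬ (sub <+: w ∧ (w.drop sub.length) <+: (c :: rest)) →
        sub ++ [c] ≠ w ∧
        ¬ ((sub ++ [c]) <+: w ∧ (w.drop (sub ++ [c]).length) <+: rest) := by
      intro w h
      constructor
      · intro he
        exact h ⟨⟨[c], he⟩, by rw [← he, List.drop_left]; exact ⟨rest, rfl⟩⟩
      · rintro ⟨⟨t, ht⟩, hd⟩
        apply h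
        refine ⟨⟨[c] ++ t, by rw [← ht, List.append_assoc]⟩, ?_⟩
        have hw : w = sub ++ ([c] ++ t) := by rw [← ht, List.append_assoc]
        rw [hw, List.drop_left]
        have hd' : t <+: rest := by
          have : w.drop (sub ++ [c]).length = t := by rw [← ht, List.drop_left]
          rwa [this] at hd
        obtain ⟨u, hu⟩ := hd'
        exact ⟨u, by simp [hu]⟩
    obtain ⟨ne1, g1⟩ := key _ h1
    obtain ⟨ne2, g2⟩ := key _ h2
    obtain ⟨ne3, g3⟩ := key _ h3
    have hmk : pvWordDict = PySem.Dict.mk [(['o','n','e'], 1), (['t','w','o'], 2), (['t','h','r','e','e'], 3)] := by decide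
    have hget : PySem.Dict.get? pvWordDict (sub ++ [c]) = none := by
      rw [hmk]
      simp [PySem.Dict.get?, beq_iff_eq,
        Ne.symm ne1, Ne.symm ne2, Ne.symm ne3]
    simp only [pvALoop, hget]
    exact ih _ _ g1 g2 g3

-- A's loop consumes a leading word in |word| steps
lemma pvALoop_one (tl : List Char) (acc : Int) :
    pvALoop ('o' :: 'n' :: 'e' :: tl) [] acc = pvALoop tl [] (acc + 1) := rfl
lemma pvALoop_two (tl : List Char) (acc : Int) :
    pvALoop ('t' :: 'w' :: 'o' :: tl) [] acc = pvALoop tl [] (acc + 2) := rfl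
lemma pvALoop_three (tl : List Char) (acc : Int) :
    pvALoop ('t' :: 'h' :: 'r' :: 'e' :: 'e' :: tl) [] acc = pvALoop tl [] (acc + 3) := rfl

lemma pvLoop_agree : ∀ (n : Nat) (rem : List Char) (acc : Int), rem.length ≤ n →
    pvALoop rem [] acc = acc + pvBLoop rem := by
  intro n
  induction n with
  | zero =>
    intro rem acc hle
    have : rem = [] := List.eq_nil_of_length_eq_zero (Nat.le_zero.mp hle)
    subst this; simp [pvALoop, pvBLoop]
  | succ m ih =>
    intro rem acc hle
    match rem with
    | [] => simp [pvALoop, pvBLoop]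
    | c :: rest =>
      by_cases h1 : (c :: rest).take 3 = ['o','n','e']
      · match rest with
        | r1 :: r2 :: tl =>
          simp only [List.take, List.cons.injEq] at h1
          obtain ⟨hc, hr1, hr2, -⟩ := h1
          subst hc hr1 hr2
          rw [pvALoop_one, ih tl (acc + 1) (by simp at hle ⊢; omega)]
          rw [show pvBLoop ('o' :: 'n' :: 'e' :: tl) = 1 + pvBLoop tl from by
            rw [pvBLoop]; simp]
          ring
        | [] => simp [List.take] at h1
        | [r1] => simp [List.take] at h1
      · by_cases h2 : (c :: rest).take 3 = ['t','w','o']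
        · match rest with
          | r1 :: r2 :: tl =>
            simp only [List.take, List.cons.injEq] at h2
            obtain ⟨hc, hr1, hr2, -⟩ := h2
            subst hc hr1 hr2
            rw [pvALoop_two, ih tl (acc + 2) (by simp at hle ⊢; omega)]
            rw [show pvBLoop ('t' :: 'w' :: 'o' :: tl) = 2 + pvBLoop tl from by
              rw [pvBLoop]; simp]
            ring
          | [] => simp [List.take] at h2
          | [r1] => simp [List.take] at h2
        · by_cases h3 : (c :: rest).take 5 = ['t','h','r','e','e']
          · match rest with
            | r1 :: r2 :: r3 :: r4 :: tl =>
              simp only [List.take, List.cons.injEq] at h3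
              obtain ⟨hc, hr1, hr2, hr3, hr4, -⟩ := h3
              subst hc hr1 hr2 hr3 hr4
              rw [pvALoop_three, ih tl (acc + 3) (by simp at hle ⊢; omega)]
              rw [show pvBLoop ('t' :: 'h' :: 'r' :: 'e' :: 'e' :: tl) = 3 + pvBLoop tl from by
                rw [pvBLoop]; simp]
              ring
            | [] => simp [List.take] at h3
            | [r1] => simp [List.take] at h3
            | [r1, r2] => simp [List.take] at h3
            | [r1, r2, r3] => simp [List.take] at h3
          · have hb : pvBLoop (c :: rest) = 0 := by rw [pvBLoop, if_neg h1, if_neg h2, if_neg h3]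
            have hnp : ∀ (w : List Char), ¬ w = (c :: rest).take w.length →
                ¬ (([] : List Char) <+: w ∧ (w.drop (List.length ([] : List Char))) <+: (c :: rest)) := by
              rintro w hw ⟨-, hd⟩
              exact hw (List.prefix_iff_eq_take.mp (by simpa using hd))
            rw [pvALoop_dead (c :: rest) [] acc
              (hnp _ (by simpa using Ne.symm h1)) (hnp _ (by simpa using Ne.symm h2))
              (hnp _ (by simpa using Ne.symm h3))]
            omega

-- ===== VERDICT (by name: the statement is the Claim_ definition above) =====
theorem sum_of_digit_words_spec : Claim_equal_sum_of_digit_words := by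
  intro s _
  unfold Spec_sum_of_digit_words sum_of_digit_words sum_of_digit_words_alt
  rw [pvLoop_agree (PySem.Str.lower s).toList.length _ 0 le_rfl]
  ring
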